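-- pv_equiv track=rewrite | github.com/pierrepo/mdner | scripts/run_scoring_analysis.py | extract_entities_from_annotation
-- ===== SOURCE A (Python) =====
-- from typing import Any, Dict, List, Tuple, Union
--
-- TAGS = ["MOL", "SOFTNAME", "SOFTVERS", "STIME", "TEMP", "FFM"]
--
-- def extract_entities_from_annotation(text: str, entities: list) -> Dict[str, List[str]]:
--     result = {key: [] for key in TAGS}
--     for start, end, entity_type in entities:
--         if entity_type == 'SOFT':
--             entity_type = 'SOFTNAME'
--         if entity_type in result:
--             result[entity_type].append(text[start:end])
--     return result
-- ===== SOURCE B (Python) =====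
-- TAGS = ["MOL", "SOFTNAME", "SOFTVERS", "STIME", "TEMP", "FFM"]
--
-- def extract_entities_from_annotation(text: str, entities: list):
--     # Per-key rescan: build the dict keyed by the fixed TAGS list,
--     # collecting for each key the substrings of entities whose remapped type matches.
--     return {key: [text[start:end] for start, end, entity_type in entities
--                   if ('SOFTNAME' if entity_type == 'SOFT' else entity_type) == key]
--             for key in TAGS}
-- ===== Notes on version B (the rewrite author's own statement) =====
-- stated objective: alternative
-- what changed: Replaced A's single dispatching pass that appends into a pre-built dict with a dict comprehension over the fixed TAGS list, where each key's bucket is collected by its own filtered rescan of the entities.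
import Mathlib
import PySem

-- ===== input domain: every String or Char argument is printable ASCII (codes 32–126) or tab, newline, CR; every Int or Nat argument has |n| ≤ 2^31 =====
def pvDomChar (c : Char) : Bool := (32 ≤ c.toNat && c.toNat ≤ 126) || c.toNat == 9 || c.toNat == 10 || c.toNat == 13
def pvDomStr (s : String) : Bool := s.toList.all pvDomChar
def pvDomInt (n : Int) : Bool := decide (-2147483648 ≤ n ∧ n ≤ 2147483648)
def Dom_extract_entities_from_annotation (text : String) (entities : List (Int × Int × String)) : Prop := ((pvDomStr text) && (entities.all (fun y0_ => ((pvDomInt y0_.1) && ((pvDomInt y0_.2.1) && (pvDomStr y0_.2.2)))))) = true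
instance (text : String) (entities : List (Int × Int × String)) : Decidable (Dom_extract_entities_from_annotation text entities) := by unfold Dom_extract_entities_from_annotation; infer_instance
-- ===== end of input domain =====

-- B replaces A's single dispatching pass over entities with a per-key filtered rescan keyed by the fixed TAGS list (alternative decomposition, same cost).


-- ===== PORT A =====
def pvTAGS : List String := ["MOL", "SOFTNAME", "SOFTVERS", "STIME", "TEMP", "FFM"]

-- one iteration of A's loop body: remap SOFT, then append into the dict if the key exists
def pvStepA (text : String) (d : PySem.Dict String (List String)) (p : Int × Int × String) :
    PySem.Dict String (List String) :=
  let entity_type := if p.2.2 = "SOFT" then "SOFTNAME" else p.2.2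
  if d.contains entity_type then
    d.modify entity_type [] (fun l => l ++ [PySem.Str.slice text (some p.1) (some p.2.1)])
  else d

def extract_entities_from_annotation (text : String) (entities : List (Int × Int × String)) : List (String × List String) :=
  let result : PySem.Dict String (List String) :=
    pvTAGS.foldl (fun d key => d.insert key []) PySem.Dict.empty
  (entities.foldl (pvStepA text) result).items

-- ===== PORT B =====
def extract_entities_from_annotation_alt (text : String) (entities : List (Int × Int × String)) : List (String × List String) :=
  pvTAGS.map (fun key =>
    (key, (entities.filter (fun p => (if p.2.2 = "SOFT" then "SOFTNAME" else p.2.2) = key)).map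
            (fun p => PySem.Str.slice text (some p.1) (some p.2.1))))

-- ===== PRECONDITION & SPEC =====
def Spec_extract_entities_from_annotation (text : String) (entities : List (Int × Int × String)) (out : List (String × List String)) : Prop := out = extract_entities_from_annotation_alt text entities
instance (text : String) (entities : List (Int × Int × String)) (out : List (String × List String)) : Decidable (Spec_extract_entities_from_annotation text entities out) := by unfold Spec_extract_entities_from_annotation; infer_instance

-- ===== CLAIM (what is proved, stated in full; the proofs are below) =====
def Claim_equal_extract_entities_from_annotation : Prop := ∀ (text : String) (entities : List (Int × Int × String)), Dom_extract_entities_from_annotation text entities → Spec_extract_entities_from_annotation text entities (extract_entities_from_annotation text entities)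

-- ===== LEMMAS AND PROOFS =====

-- the bucket B collects for one key
def pvBucket (text : String) (l : List (Int × Int × String)) (key : String) : List String :=
  (l.filter (fun p => (if p.2.2 = "SOFT" then "SOFTNAME" else p.2.2) = key)).map
    (fun p => PySem.Str.slice text (some p.1) (some p.2.1))

-- loop invariant of A's fold: a dict over the six tags accumulates exactly B's buckets
lemma pv_inv (text : String) (l : List (Int × Int × String))
    (a b c d e f : List String) :
    (l.foldl (pvStepA text)
      (PySem.Dict.mk [("MOL", a), ("SOFTNAME", b), ("SOFTVERS", c), ("STIME", d), ("TEMP", e), ("FFM", f)])).items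
    = [("MOL", a ++ pvBucket text l "MOL"), ("SOFTNAME", b ++ pvBucket text l "SOFTNAME"),
       ("SOFTVERS", c ++ pvBucket text l "SOFTVERS"), ("STIME", d ++ pvBucket text l "STIME"),
       ("TEMP", e ++ pvBucket text l "TEMP"), ("FFM", f ++ pvBucket text l "FFM")] := by
  induction l generalizing a b c d e f with
  | nil => simp [pvBucket]
  | cons hd tl ih =>
    obtain ⟨s, en, t0⟩ := hd
    set t' := if t0 = "SOFT" then "SOFTNAME" else t0 with ht'
    by_cases h1 : t' = "MOL"
    · simp only [List.foldl_cons, pvStepA, ← ht', h1, pvBucket, List.filter_cons]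
      simp [PySem.Dict.contains, PySem.Dict.modify, PySem.Dict.insert, PySem.Dict.getD,
            PySem.Dict.get?, ih, pvBucket]
    · by_cases h2 : t' = "SOFTNAME"
      · simp only [List.foldl_cons, pvStepA, ← ht', h2, pvBucket, List.filter_cons]
        simp [PySem.Dict.contains, PySem.Dict.modify, PySem.Dict.insert, PySem.Dict.getD,
              PySem.Dict.get?, ih, pvBucket]
      · by_cases h3 : t' = "SOFTVERS"
        · simp only [List.foldl_cons, pvStepA, ← ht', h3, pvBucket, List.filter_cons]
          simp [PySem.Dict.contains, PySem.Dict.modify, PySem.Dict.insert, PySem.Dict.getD,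
                PySem.Dict.get?, ih, pvBucket]
        · by_cases h4 : t' = "STIME"
          · simp only [List.foldl_cons, pvStepA, ← ht', h4, pvBucket, List.filter_cons]
            simp [PySem.Dict.contains, PySem.Dict.modify, PySem.Dict.insert, PySem.Dict.getD,
                  PySem.Dict.get?, ih, pvBucket]
          · by_cases h5 : t' = "TEMP"
            · simp only [List.foldl_cons, pvStepA, ← ht', h5, pvBucket, List.filter_cons]
              simp [PySem.Dict.contains, PySem.Dict.modify, PySem.Dict.insert, PySem.Dict.getD,
                    PySem.Dict.get?, ih, pvBucket]
            · by_cases h6 : t' = "FFM"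
              · simp only [List.foldl_cons, pvStepA, ← ht', h6, pvBucket, List.filter_cons]
                simp [PySem.Dict.contains, PySem.Dict.modify, PySem.Dict.insert, PySem.Dict.getD,
                      PySem.Dict.get?, ih, pvBucket]
              · simp only [List.foldl_cons, pvStepA, ← ht', pvBucket, List.filter_cons]
                simp [PySem.Dict.contains, Ne.symm h1, Ne.symm h2, Ne.symm h3, Ne.symm h4,
                      Ne.symm h5, Ne.symm h6, h1, h2, h3, h4, h5, h6, ih, pvBucket]

-- ===== VERDICT (by name: the statement is the Claim_ definition above) =====
theorem extract_entities_from_annotation_spec : Claim_equal_extract_entities_from_annotation := by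
  intro text entities _
  unfold Spec_extract_entities_from_annotation
  show (entities.foldl (pvStepA text)
      (pvTAGS.foldl (fun d key => d.insert key []) PySem.Dict.empty)).items = _
  have hinit : pvTAGS.foldl (fun (d : PySem.Dict String (List String)) key => d.insert key []) PySem.Dict.empty
      = PySem.Dict.mk [("MOL", []), ("SOFTNAME", []), ("SOFTVERS", []), ("STIME", []), ("TEMP", []), ("FFM", [])] := by
    decide
  rw [hinit, pv_inv]
  simp [extract_entities_from_annotation_alt, pvTAGS, pvBucket]
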